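-- pv_equiv track=rewrite | github.com/ndtands/NER_VLSP2021 | processing/pre_processing.py | cutting_subword
-- ===== SOURCE A (Python) =====
-- def isNotSubword(x, idx, sub = '##'):
--     return sub in x[idx] and idx < len(x) - 1 and sub in x[idx+1]
--
-- def cutting_subword(X, sub = '##', size=256):
--     res_X = []
--     punct = '.!?'
--     st = 0
--     cur = 0
--     while (st < len(X)-size):
--         flag = True
--         for i in range(st+size-1, st-1, -1):
--             if X[i] in punct and isNotSubword(X, i, sub):
--                 cur = i+1
--                 flag = False
--                 break
--         if flag:
--             for i in range(st+size-1, st-1, -1):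
--                 if isNotSubword(X, i, sub):
--                     cur = i+1
--                     break
--         if st == cur:
--             cur += size
--         res_X.append(X[st: cur])
--         st = cur
--     res_X.append(X[cur:])
--     return res_X
-- ===== SOURCE B (Python) =====
-- def cutting_subword(X, sub='##', size=256):
--     # One pass precomputes, for every index j, the last punct-break and last
--     # subword-break position <= j; each chunk end is then an O(1) lookup.
--     punct = '.!?'
--     n = len(X)
--     prev = []
--     lp = ln = -1
--     for i in range(n):
--         ns = sub in X[i] and i < n - 1 and sub in X[i + 1]
--         if X[i] in punct and ns:
--             lp = i
--         if ns:
--             ln = i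
--         prev.append((lp, ln))
--     res = []
--     st = 0
--     while st < n - size:
--         p, q = prev[st + size - 1]
--         if st <= p:
--             cur = p + 1
--         elif st <= q:
--             cur = q + 1
--         else:
--             cur = st + size
--         res.append(X[st:cur])
--         st = cur
--     res.append(X[st:])
--     return res
-- ===== Notes on version B (the rewrite author's own statement) =====
-- stated objective: alternative
-- what changed: Instead of A's per-chunk backward scan over the window, B builds in one pass a table of the last punct-break and last subword-break position at or before each index, so each chunk end becomes a single table lookup; worst-case cost drops from O(n*size) to O(n), though on typical data A's scans stop early and B is not measurably faster.
import Mathlib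
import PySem

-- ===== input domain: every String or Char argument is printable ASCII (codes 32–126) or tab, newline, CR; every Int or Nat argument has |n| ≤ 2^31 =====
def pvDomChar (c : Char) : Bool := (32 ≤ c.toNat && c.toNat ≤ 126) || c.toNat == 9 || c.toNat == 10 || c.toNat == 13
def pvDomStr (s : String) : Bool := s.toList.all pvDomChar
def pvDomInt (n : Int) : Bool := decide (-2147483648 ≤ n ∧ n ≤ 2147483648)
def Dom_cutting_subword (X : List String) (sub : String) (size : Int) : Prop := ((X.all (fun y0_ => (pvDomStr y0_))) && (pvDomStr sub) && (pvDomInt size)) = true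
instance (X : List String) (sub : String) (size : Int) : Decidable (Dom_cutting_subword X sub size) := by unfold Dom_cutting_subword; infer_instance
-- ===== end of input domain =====

-- B replaces A's per-chunk backward scans by a single precomputed last-break-position table (alternative one-pass structure).


-- ===== PORT A =====
-- helper isNotSubword(x, idx, sub): 'sub in x[idx] and idx < len(x)-1 and sub in x[idx+1]'
-- (x[idx] / x[idx+1] ported with pyGetD ""; inside Pre_ every access is in range, so the default is never the value used)
def pvIsNotSubword (x : List String) (idx : Int) (sub : String) : Bool :=
  PySem.Str.isIn sub (PySem.List.pyGetD x idx "") &&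
  decide (idx < (x.length : Int) - 1) &&
  PySem.Str.isIn sub (PySem.List.pyGetD x (idx + 1) "")

-- the while loop of A; state (st, cur, res_X); fuel makes the recursion structural (enough fuel is supplied on Pre_)
def pvLoopA (X : List String) (sub : String) (size : Int) :
    Nat → Int → Int → List (List String) → List (List String) × Int
  | 0, _, cur, res => (res, cur)
  | fuel + 1, st, cur, res =>
    if st < (X.length : Int) - size then
      let r := PySem.List.pyRange (st + size - 1) (st - 1) (-1)
      let cur1 :=
        match r.find? (fun i => PySem.Str.isIn (PySem.List.pyGetD X i "") ".!?" && pvIsNotSubword X i sub) with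
        | some i => i + 1
        | none =>
          match r.find? (fun i => pvIsNotSubword X i sub) with
          | some i => i + 1
          | none => cur
      let cur2 := if st == cur1 then cur1 + size else cur1
      pvLoopA X sub size fuel cur2 cur2 (res ++ [PySem.List.slice X (some st) (some cur2)])
    else (res, cur)

def cutting_subword (X : List String) (sub : String) (size : Int) : List (List String) :=
  let p := pvLoopA X sub size (X.length + 1) 0 0 []
  p.1 ++ [PySem.List.slice X (some p.2) none]

-- ===== PORT B =====
-- one pass over X building prev[j] = (last punct-break ≤ j, last subword-break ≤ j)
def pvPrevTable (X : List String) (sub : String) : List (Int × Int) :=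
  ((PySem.List.pyRange 0 (X.length : Int) 1).foldl
    (fun s i =>
      let ns := PySem.Str.isIn sub (PySem.List.pyGetD X i "") &&
                decide (i < (X.length : Int) - 1) &&
                PySem.Str.isIn sub (PySem.List.pyGetD X (i + 1) "")
      let lp := if PySem.Str.isIn (PySem.List.pyGetD X i "") ".!?" && ns then i else s.1
      let ln := if ns then i else s.2.1
      (lp, ln, s.2.2 ++ [(lp, ln)]))
    (-1, -1, ([] : List (Int × Int)))).2.2

-- the while loop of B; state (st, res); chunk end is an O(1) table lookup
def pvLoopB (X : List String) (size : Int) (prev : List (Int × Int)) :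
    Nat → Int → List (List String) → List (List String) × Int
  | 0, st, res => (res, st)
  | fuel + 1, st, res =>
    if st < (X.length : Int) - size then
      let pq := PySem.List.pyGetD prev (st + size - 1) (-1, -1)
      let cur := if st ≤ pq.1 then pq.1 + 1 else if st ≤ pq.2 then pq.2 + 1 else st + size
      pvLoopB X size prev fuel cur (res ++ [PySem.List.slice X (some st) (some cur)])
    else (res, st)

def cutting_subword_alt (X : List String) (sub : String) (size : Int) : List (List String) :=
  let p := pvLoopB X size (pvPrevTable X sub) (X.length + 1) 0 []
  p.1 ++ [PySem.List.slice X (some p.2) none]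

-- ===== PRECONDITION & SPEC =====
-- Pre_ excludes exactly the inputs on which Python A never returns: for size ≤ 0 the loop cannot
-- advance (st never increases) and A diverges, except in the trivial case X = [] with size = 0.
def Pre_cutting_subword (X : List String) (sub : String) (size : Int) : Prop :=
  1 ≤ size ∨ (X = [] ∧ size = 0)
instance (X : List String) (sub : String) (size : Int) : Decidable (Pre_cutting_subword X sub size) := by
  unfold Pre_cutting_subword; infer_instance

def pvWitness_cutting_subword : List String × String × Int := (["a##", "##b", ".", "x"], "##", 2)

def Spec_cutting_subword (X : List String) (sub : String) (size : Int) (out : List (List String)) : Prop := out = cutting_subword_alt X sub size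
instance (X : List String) (sub : String) (size : Int) (out : List (List String)) : Decidable (Spec_cutting_subword X sub size out) := by unfold Spec_cutting_subword; infer_instance

-- ===== CLAIM (what is proved, stated in full; the proofs are below) =====
def Claim_equal_cutting_subword : Prop := ∀ (X : List String) (sub : String) (size : Int), Dom_cutting_subword X sub size → Pre_cutting_subword X sub size → Spec_cutting_subword X sub size (cutting_subword X sub size)

-- ===== LEMMAS AND PROOFS =====

-- value of the running "last index < m satisfying P" accumulator after m steps (-1 if none)
def pvLastHit (P : Int → Bool) : Nat → Int
  | 0 => -1
  | m + 1 => if P (m : Int) then (m : Int) else pvLastHit P m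

theorem pvLastHit_lt (P : Int → Bool) (m : Nat) : pvLastHit P m < (m : Int) := by
  induction m with
  | zero => simp [pvLastHit]
  | succ k ih =>
    simp only [pvLastHit]
    split
    · push_cast; omega
    · push_cast; omega

-- a backward find over [lo..hi] returns the last hit ≤ hi iff it is ≥ lo
theorem pvFindDesc (P : Int → Bool) (hi lo : Nat) (h : lo ≤ hi) :
    (PySem.List.pyRange (hi : Int) ((lo : Int) - 1) (-1)).find? P
      = if (lo : Int) ≤ pvLastHit P (hi + 1) then some (pvLastHit P (hi + 1)) else none := by
  induction hi generalizing lo with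
  | zero =>
    interval_cases lo
    rw [PySem.List.pyRange_neg_one_cons (by norm_num)]
    rw [PySem.List.pyRange_neg_one_eq_nil (by norm_num)]
    simp only [List.find?]
    by_cases h0 : P 0 <;> simp [pvLastHit, h0]
  | succ k ih =>
    rw [PySem.List.pyRange_neg_one_cons (by push_cast; omega)]
    simp only [List.find?]
    by_cases hP : P ((k : Int) + 1)
    · have : ((k + 1 : Nat) : Int) = (k : Int) + 1 := by push_cast; ring
      simp [pvLastHit, this, hP]
      omega
    · have hcast : ((k + 1 : Nat) : Int) = (k : Int) + 1 := by push_cast; ring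
      simp only [hcast, hP]
      have hLH : pvLastHit P (k + 1 + 1) = pvLastHit P (k + 1) := by
        simp [pvLastHit, hcast, hP]
      rcases Nat.lt_or_ge lo (k + 1) with hlt | hge
      · have hcons : ((k + 1 : Nat) : Int) - 1 = (k : Int) := by push_cast; ring
        rw [show (k : Int) + 1 - 1 = (k : Int) by ring] at *
        rw [hLH]
        exact ih lo (by omega)
      · have hlo : lo = k + 1 := by omega
        subst hlo
        rw [show (k : Int) + 1 - 1 = (k : Int) by ring]
        rw [PySem.List.pyRange_neg_one_eq_nil (by push_cast; omega)]
        have := pvLastHit_lt P (k + 1)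
        rw [hLH]
        simp only [List.find?_nil]
        rw [if_neg (by push_cast at *; omega)]

-- the table-building fold computes pvLastHit at every index
theorem pvFoldPrev (f g : Int → Bool) (m : Nat) :
    (PySem.List.pyRange 0 (m : Int) 1).foldl
      (fun (s : Int × Int × List (Int × Int)) i =>
        let lp := if f i then i else s.1
        let ln := if g i then i else s.2.1
        (lp, ln, s.2.2 ++ [(lp, ln)]))
      (-1, -1, ([] : List (Int × Int)))
    = (pvLastHit f m, pvLastHit g m,
       (List.range m).map (fun j => (pvLastHit f (j + 1), pvLastHit g (j + 1)))) := by
  induction m with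
  | zero => simp [PySem.List.pyRange_one_eq_nil, pvLastHit]
  | succ k ih =>
    have : ((k + 1 : Nat) : Int) = (k : Int) + 1 := by push_cast; ring
    rw [this, PySem.List.pyRange_one_succ_right (by positivity), List.foldl_append, ih]
    simp [List.range_succ, pvLastHit]

-- B's table at index j holds exactly the two last-hit values
theorem pvPrevTable_eq (X : List String) (sub : String) :
    pvPrevTable X sub = (List.range X.length).map (fun j =>
      (pvLastHit (fun i => PySem.Str.isIn (PySem.List.pyGetD X i "") ".!?" && pvIsNotSubword X i sub) (j + 1),
       pvLastHit (fun i => pvIsNotSubword X i sub) (j + 1))) :=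
  congrArg (fun t => t.2.2)
    (pvFoldPrev (fun i => PySem.Str.isIn (PySem.List.pyGetD X i "") ".!?" && pvIsNotSubword X i sub)
      (fun i => pvIsNotSubword X i sub) X.length)

-- the two while loops coincide (A's loop-head invariant cur = st is built into the statement)
theorem pvLoops_eq (X : List String) (sub : String) (size : Int) (hsz : 1 ≤ size) :
    ∀ (fuel : Nat) (st : Int) (res : List (List String)), 0 ≤ st →
      pvLoopA X sub size fuel st st res = pvLoopB X size (pvPrevTable X sub) fuel st res := by
  intro fuel
  induction fuel with
  | zero => intros; rfl
  | succ k ih =>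
    intro st res hst
    by_cases hc : st < (X.length : Int) - size
    · have hstc : ((st.toNat : Nat) : Int) = st := Int.toNat_of_nonneg hst
      have hhic : (((st + size - 1).toNat : Nat) : Int) = st + size - 1 := Int.toNat_of_nonneg (by omega)
      have hlohi : st.toNat ≤ (st + size - 1).toNat := by omega
      have hhilt : (st + size - 1).toNat < X.length := by omega
      simp only [pvLoopA, pvLoopB, if_pos hc]
      rw [show st - 1 = ((st.toNat : Nat) : Int) - 1 by omega,
          show st + size - 1 = (((st + size - 1).toNat : Nat) : Int) by omega]
      rw [pvFindDesc _ _ _ hlohi, pvFindDesc _ _ _ hlohi]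
      rw [pvPrevTable_eq]
      rw [PySem.List.pyGetD_natCast]
      rw [PySem.List.getD_map_range _ _ _ _ hhilt]
      set P := fun i => PySem.Str.isIn (PySem.List.pyGetD X i "") ".!?" && pvIsNotSubword X i sub with hP
      set N := fun i => pvIsNotSubword X i sub with hN
      set p := pvLastHit P ((st + size - 1).toNat + 1) with hp
      set q := pvLastHit N ((st + size - 1).toNat + 1) with hq
      simp only [hstc]
      by_cases h1 : st ≤ p
      · simp only [if_pos h1]
        have : (st == p + 1) = false := by simp; omega
        simp only [this, Bool.false_eq_true, if_false]
        rw [← pvPrevTable_eq]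
        exact ih (p + 1) _ (by omega)
      · simp only [if_neg h1]
        by_cases h2 : st ≤ q
        · simp only [if_pos h2]
          have : (st == q + 1) = false := by simp; omega
          simp only [this, Bool.false_eq_true, if_false]
          rw [← pvPrevTable_eq]
          exact ih (q + 1) _ (by omega)
        · simp only [if_neg h2]
          have : (st == st) = true := by simp
          simp only [this, if_true]
          rw [← pvPrevTable_eq]
          exact ih (st + size) _ (by omega)
    · simp [pvLoopA, pvLoopB, hc]

-- ===== VERDICT (by name: the statement is the Claim_ definition above) =====
theorem cutting_subword_spec : Claim_equal_cutting_subword := by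
  intro X sub size _ hpre
  unfold Spec_cutting_subword
  rcases hpre with hsz | ⟨hX, hs⟩
  · unfold cutting_subword cutting_subword_alt
    rw [pvLoops_eq X sub size hsz (X.length + 1) 0 [] le_rfl]
  · subst hX; subst hs; rfl
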